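-- pv_equiv track=rewrite | github.com/ariuk44/retake_exam_prep | day_3.py | isRailroadTie
-- ===== SOURCE A (Python) =====
-- def isRailroadTie(arr):
--     n = len(arr)
--     if n == 0:
--         return 0
--     if all(x == 0 for x in arr):
--         return 0
--     for i in range(n):
--         if arr[i] == 0:
--             if i == 0 or i == n - 1:
--                 return 0
--             if arr[i - 1] == 0 or arr[i + 1] == 0:
--                 return 0
--         else:
--             neighbors = 0
--             if i > 0 and arr[i - 1] != 0:
--                 neighbors += 1
--             if i < n - 1 and arr[i + 1] != 0:
--                 neighbors += 1
--             if neighbors != 1: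
--                 return 0
--     return 1
-- ===== SOURCE B (Python) =====
-- def isRailroadTie(arr):
--     # Iterative pattern matcher: a valid tie is (x y) followed by zero or more
--     # (0 x y) blocks, with x, y nonzero.  Consumes the list three at a time.
--     n = len(arr)
--     i = 0
--     while n - i >= 2 and arr[i] != 0 and arr[i + 1] != 0:
--         if i + 2 == n:
--             return 1
--         if arr[i + 2] != 0:
--             return 0
--         i += 3
--     return 0
-- ===== Notes on version B (the rewrite author's own statement) =====
-- stated objective: simpler
-- what changed: Replaced the per-index neighbor-counting scan (with a separate all-zero pre-pass) by a single grammar-style matcher that consumes the list three elements at a time, checking the pattern (x y)(0 x y)* with x,y nonzero.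
import Mathlib
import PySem

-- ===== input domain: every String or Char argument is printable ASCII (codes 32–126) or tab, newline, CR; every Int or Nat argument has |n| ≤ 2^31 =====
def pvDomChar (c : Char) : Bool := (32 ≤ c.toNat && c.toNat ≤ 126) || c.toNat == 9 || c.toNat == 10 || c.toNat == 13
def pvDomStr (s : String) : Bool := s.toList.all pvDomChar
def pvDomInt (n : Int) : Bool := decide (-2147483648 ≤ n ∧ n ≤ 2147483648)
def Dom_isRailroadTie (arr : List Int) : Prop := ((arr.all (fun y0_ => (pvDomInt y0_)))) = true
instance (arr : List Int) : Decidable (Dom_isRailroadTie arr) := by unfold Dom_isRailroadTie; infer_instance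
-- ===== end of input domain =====

-- B replaces A's per-index neighbor-counting scan (with its separate all-zero
-- pre-pass) by a pattern matcher consuming the list three elements at a time
-- (objective: simpler).

-- ===== PORT A =====
-- body of A's for-loop at index i: true = no early `return 0` at index i.
-- All list accesses are guarded in range exactly as in the Python (the guards
-- precede the accesses in the same order), so List.getD is exact here: Python
-- never raises IndexError and never uses a negative index in this loop.
def aBody (arr : List Int) (n : Nat) (i : Nat) : Bool :=
  if arr.getD i 0 = 0 then
    if i = 0 ∨ i = n - 1 then false
    else if arr.getD (i - 1) 0 = 0 ∨ arr.getD (i + 1) 0 = 0 then false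
    else true
  else
    let neighbors : Int := 0
    let neighbors := if 0 < i ∧ arr.getD (i - 1) 0 ≠ 0 then neighbors + 1 else neighbors
    let neighbors := if i < n - 1 ∧ arr.getD (i + 1) 0 ≠ 0 then neighbors + 1 else neighbors
    if neighbors ≠ 1 then false else true

def isRailroadTie (arr : List Int) : Int :=
  let n := arr.length
  if n = 0 then 0
  else if arr.all (fun x => x == 0) then 0
  else if (List.range n).all (fun i => aBody arr n i) then 1 else 0

-- ===== PORT B =====
-- the while loop of Source B; the loop index i is represented by the remaining
-- suffix arr[i:], and the loop tests appear in the same order as in Source B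
def bLoop : List Int → Int
  | a :: b :: [] => if a = 0 ∨ b = 0 then 0 else 1
  | a :: b :: c :: l => if a = 0 ∨ b = 0 then 0 else if c ≠ 0 then 0 else bLoop l
  | _ => 0

def isRailroadTie_alt (arr : List Int) : Int := bLoop arr

-- ===== PRECONDITION & SPEC =====
def Spec_isRailroadTie (arr : List Int) (out : Int) : Prop := out = isRailroadTie_alt arr
instance (arr : List Int) (out : Int) : Decidable (Spec_isRailroadTie arr out) := by unfold Spec_isRailroadTie; infer_instance

-- ===== CLAIM (what is proved, stated in full; the proofs are below) =====
def Claim_equal_isRailroadTie : Prop := ∀ (arr : List Int), Dom_isRailroadTie arr → Spec_isRailroadTie arr (isRailroadTie arr)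

-- ===== LEMMAS AND PROOFS =====

-- proof-only abbreviation: A's loop ran to the end without an early `return 0`
def allR (arr : List Int) : Bool := (List.range arr.length).all (fun i => aBody arr arr.length i)

theorem all_congr' {α : Type} (l : List α) (p q : α → Bool) (h : ∀ x ∈ l, p x = q x) :
    l.all p = l.all q := by
  induction l with
  | nil => rfl
  | cons x xs ih =>
    simp only [List.all_cons, h x (List.mem_cons_self), ih fun y hy => h y (List.mem_cons_of_mem _ hy)]

theorem allR_false_at (arr : List Int) (i : Nat) (hi : i < arr.length)
    (h : aBody arr arr.length i = false) : allR arr = false := by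
  unfold allR
  rw [List.all_eq_false]
  exact ⟨i, List.mem_range.mpr hi, by simp [h]⟩

theorem allR_head_zero (l : List Int) : allR ((0 : Int) :: l) = false := by
  refine allR_false_at _ 0 (by simp) ?_
  simp [aBody]

-- shift lemma: the loop body on a :: b :: 0 :: l at index j+3 is the body on l at j
theorem aBody_shift (a b : Int) (l : List Int) (j : Nat) (hj : j < l.length) :
    aBody (a :: b :: 0 :: l) (l.length + 3) (j + 3) = aBody l l.length j := by
  match j with
  | 0 =>
    simp only [aBody, List.getD_cons_succ, List.getD_cons_zero]
    by_cases h0 : l.getD 0 0 = 0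
    · simp only [h0, if_pos]
      match l, hj with
      | [x], _ => norm_num
      | x :: y :: l', _ => norm_num
    · simp only [h0, if_false]
      norm_num
      match l, hj with
      | [x], _ => norm_num
      | x :: y :: l', _ => norm_num
  | (k+1) =>
    have e0 : (a :: b :: 0 :: l).getD (k+1+3) 0 = l.getD (k+1) 0 := rfl
    have e1 : (a :: b :: 0 :: l).getD (k+1+3-1) 0 = l.getD k 0 := rfl
    have e2 : (a :: b :: 0 :: l).getD (k+1+3+1) 0 = l.getD (k+1+1) 0 := rfl
    have e3 : (k+1-1 : Nat) = k := rfl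
    simp only [aBody, e0, e1, e2, e3]
    have c1 : (k+1+3 = 0 ∨ k+1+3 = l.length+3-1) ↔ (k+1 = 0 ∨ k+1 = l.length-1) := by omega
    have c3 : (k+1+3 < l.length+3-1) ↔ (k+1 < l.length-1) := by omega
    have c4 : (0 < k+1+3) ↔ (0 < k+1) := by omega
    simp only [c1, c3, c4]

-- key reduction: on a :: b :: 0 :: l with a,b nonzero, A's loop succeeds iff
-- l is nonempty and A's loop succeeds on l
theorem allR_cons3 (a b : Int) (l : List Int) (ha : ¬ a = 0) (hb : ¬ b = 0) :
    allR (a :: b :: (0 : Int) :: l) = (!l.isEmpty && allR l) := by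
  cases l with
  | nil =>
    have h2 : aBody [a, b, 0] 3 2 = false := by simp [aBody]
    have h := allR_false_at [a, b, 0] 2 (by simp) h2
    simp [h]
  | cons x l' =>
    show (List.range (l'.length + 4)).all
        (fun i => aBody (a :: b :: 0 :: x :: l') (l'.length + 4) i)
      = (!(x :: l').isEmpty && allR (x :: l'))
    have hr : List.range (l'.length + 4)
        = [0, 1, 2] ++ (List.range (l'.length + 1)).map (3 + ·) := by
      rw [show l'.length + 4 = 3 + (l'.length + 1) by omega]; exact List.range_add
    rw [hr]
    simp only [List.all_append, List.all_cons, List.all_nil, List.all_map, Function.comp_def]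
    have hf0 : aBody (a :: b :: 0 :: x :: l') (l'.length + 4) 0 = true := by
      simp [aBody, ha, hb]
    have hf1 : aBody (a :: b :: 0 :: x :: l') (l'.length + 4) 1 = true := by
      simp [aBody, ha, hb]
    have hS : ((List.range (l'.length + 1)).all
        fun j => aBody (a :: b :: 0 :: x :: l') (l'.length + 4) (3 + j)) = allR (x :: l') := by
      show _ = (List.range (l'.length + 1)).all (fun j => aBody (x :: l') (l'.length + 1) j)
      refine all_congr' _ _ _ fun j hj => ?_
      rw [Nat.add_comm 3 j]
      exact aBody_shift a b (x :: l') j (by simpa using hj)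
    rw [hf0, hf1, hS]
    simp only [Bool.true_and]
    by_cases hx : x = 0
    · have hf2 : aBody (a :: b :: 0 :: x :: l') (l'.length + 4) 2 = false := by
        simp [aBody, hb, hx]
      rw [hf2, hx]
      simp [allR_head_zero]
    · have hf2 : aBody (a :: b :: 0 :: x :: l') (l'.length + 4) 2 = true := by
        simp [aBody, hb, hx]
      rw [hf2]
      simp

theorem isRR_cons (x : Int) (l : List Int) :
    isRailroadTie (x :: l) =
      if ((x :: l).all (fun v => v == 0)) then 0 else if allR (x :: l) then 1 else 0 := by
  simp [isRailroadTie, allR]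

theorem main_eq : ∀ (arr : List Int), isRailroadTie arr = bLoop arr
  | [] => by decide
  | [a] => by
    rw [isRR_cons]
    by_cases haz : a = 0
    · simp [haz, bLoop]
    · have h0 : aBody [a] 1 0 = false := by simp [aBody, haz]
      rw [allR_false_at [a] 0 (by simp) h0]
      simp [haz, bLoop]
  | a :: b :: rest => by
    rw [isRR_cons]
    by_cases haz : a = 0
    · subst haz
      by_cases hall : (((0 : Int) :: b :: rest).all (fun v => v == 0)) = true
      · rw [if_pos hall]; cases rest <;> simp [bLoop]
      · rw [if_neg hall, allR_head_zero]; cases rest <;> simp [bLoop]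
    · have hall : ¬ (((a : Int) :: b :: rest).all (fun v => v == 0)) = true := by
        simp [haz]
      rw [if_neg hall]
      by_cases hbz : b = 0
      · have h0 : aBody (a :: b :: rest) (a :: b :: rest).length 0 = false := by
          simp [aBody, haz, hbz]
        rw [allR_false_at _ 0 (by simp) h0]
        subst hbz; cases rest <;> simp [bLoop]
      · match rest with
        | [] =>
          have h0 : aBody [a, b] 2 0 = true := by simp [aBody, haz, hbz]
          have h1 : aBody [a, b] 2 1 = true := by simp [aBody, haz, hbz]
          have hT : allR [a, b] = true := by
            show (List.range 2).all (fun i => aBody [a, b] 2 i) = true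
            simp [List.range_succ, h0, h1]
          rw [hT]
          simp [bLoop, haz, hbz]
        | c :: l =>
          by_cases hcz : c = 0
          · subst hcz
            rw [allR_cons3 a b l haz hbz]
            have hB : bLoop (a :: b :: (0 : Int) :: l) = bLoop l := by
              simp [bLoop, haz, hbz]
            rw [hB, ← main_eq l]
            match l with
            | [] => simp [isRailroadTie]
            | x :: l' =>
              rw [isRR_cons]
              by_cases hx : x = 0
              · subst hx
                rw [allR_head_zero]
                simp
              · simp [hx]
          · have h1 : aBody (a :: b :: c :: l) (a :: b :: c :: l).length 1 = false := by
              simp [aBody, haz, hbz, hcz]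
            rw [allR_false_at _ 1 (by simp) h1]
            simp [bLoop, haz, hbz, hcz]

-- ===== VERDICT (by name: the statement is the Claim_ definition above) =====
theorem isRailroadTie_spec : Claim_equal_isRailroadTie := by
  intro arr _
  unfold Spec_isRailroadTie isRailroadTie_alt
  exact main_eq arr
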